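-- pv_equiv track=rewrite | github.com/pypi-data/pypi-mirror-402 | packages/synkit/synkit-1.1.1-py3-none-any.whl/synkit/CRN/Petri/structure.py | _minimal_sets
-- ===== SOURCE A (Python) =====
-- from typing import Any, List, Set
--
-- def _minimal_sets(candidates: List[Set[int]]) -> List[Set[int]]:
--     """
--     Return inclusion-minimal sets from a list of integer subsets.
--
--     A set :math:`S` is kept if it is not a strict superset of any other
--     candidate already in the output.
--
--     :reference: Standard minimality filtering in Petri net analysis.
--     """
--     out: List[Set[int]] = []
--     for S in candidates:
--         if any(T.issubset(S) for T in out):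
--             continue
--         # remove supersets of S already in out
--         out = [T for T in out if not S.issubset(T)]
--         out.append(S)
--     return out
-- ===== SOURCE B (Python) =====
-- from typing import List, Set
--
-- def _minimal_sets(candidates: List[Set[int]]) -> List[Set[int]]:
--     """Keep exactly the inclusion-minimal sets, first occurrence each,
--     by a direct filter over the original list (no evolving add/remove frontier)."""
--     out: List[Set[int]] = []
--     for S in candidates:
--         if any(T < S for T in candidates):
--             continue
--         if any(T == S for T in out):
--             continue
--         out.append(S)
--     return out
-- ===== Notes on version B (the rewrite author's own statement) =====
-- stated objective: simpler
-- what changed: Instead of maintaining an evolving frontier (skip supersets of kept sets, remove kept supersets, append), B computes the result by a single pure filter over the original list: keep S iff no candidate is a strict subset of S and no set-equal element was already kept.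
import Mathlib
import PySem

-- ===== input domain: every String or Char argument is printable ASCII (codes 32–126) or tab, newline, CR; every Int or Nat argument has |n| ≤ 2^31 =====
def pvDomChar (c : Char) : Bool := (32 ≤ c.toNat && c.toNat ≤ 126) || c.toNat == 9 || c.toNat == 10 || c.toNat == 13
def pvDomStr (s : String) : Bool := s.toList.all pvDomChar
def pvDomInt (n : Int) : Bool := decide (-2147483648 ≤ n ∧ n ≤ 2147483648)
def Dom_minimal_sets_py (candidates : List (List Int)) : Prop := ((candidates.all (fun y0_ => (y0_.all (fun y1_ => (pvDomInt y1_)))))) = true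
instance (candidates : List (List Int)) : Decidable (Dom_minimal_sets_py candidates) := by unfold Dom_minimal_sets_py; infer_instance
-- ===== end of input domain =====

-- B replaces A's evolving add/remove frontier by a single pure filter over the
-- original list (objective: simpler); inner lists model Python sets.

-- ===== PORT A =====
-- T.issubset(S) on sets modelled as lists of their elements
def pvSubset (t s : List Int) : Bool := t.all (fun x => s.contains x)

-- one iteration of A's loop body
def pvStepA (out : List (List Int)) (S : List Int) : List (List Int) :=
  if out.any (fun T => pvSubset T S) then out
  else (out.filter (fun T => !pvSubset S T)) ++ [S]

def minimal_sets_py (candidates : List (List Int)) : List (List Int) :=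
  candidates.foldl pvStepA []

-- ===== PORT B =====
-- Python's strict subset T < S and set equality T == S
def pvStrictSub (t s : List Int) : Bool := pvSubset t s && !pvSubset s t
def pvSetEq (t s : List Int) : Bool := pvSubset t s && pvSubset s t

-- one iteration of B's loop body (l is the whole candidate list)
def pvStepB (l : List (List Int)) (out : List (List Int)) (S : List Int) : List (List Int) :=
  if l.any (fun T => pvStrictSub T S) then out
  else if out.any (fun T => pvSetEq T S) then out
  else out ++ [S]

def minimal_sets_py_alt (candidates : List (List Int)) : List (List Int) :=
  candidates.foldl (pvStepB candidates) []

-- ===== PRECONDITION & SPEC =====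
def Spec_minimal_sets_py (candidates : List (List Int)) (out : List (List Int)) : Prop := out = minimal_sets_py_alt candidates
instance (candidates : List (List Int)) (out : List (List Int)) : Decidable (Spec_minimal_sets_py candidates out) := by unfold Spec_minimal_sets_py; infer_instance

-- ===== CLAIM (what is proved, stated in full; the proofs are below) =====
def Claim_equal_minimal_sets_py : Prop := ∀ (candidates : List (List Int)), Dom_minimal_sets_py candidates → Spec_minimal_sets_py candidates (minimal_sets_py candidates)

-- ===== LEMMAS AND PROOFS =====

-- B's fold with an arbitrary "minimality reference" list l
def pvG (l q : List (List Int)) : List (List Int) := q.foldl (pvStepB l) []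

-- Prop-level subset
def SubP (t s : List Int) : Prop := ∀ x, x ∈ t → x ∈ s

theorem pvSubset_iff (t s : List Int) : pvSubset t s = true ↔ SubP t s := by
  simp [pvSubset, SubP, List.all_eq_true]

theorem pvStrictSub_iff (t s : List Int) : pvStrictSub t s = true ↔ SubP t s ∧ ¬ SubP s t := by
  simp [pvStrictSub, Bool.eq_false_iff, pvSubset_iff]

theorem pvSetEq_iff (t s : List Int) : pvSetEq t s = true ↔ SubP t s ∧ SubP s t := by
  simp [pvSetEq, pvSubset_iff]

theorem SubP_refl (t : List Int) : SubP t t := fun _ h => h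

theorem SubP_trans {a b c : List Int} (h1 : SubP a b) (h2 : SubP b c) : SubP a c :=
  fun x hx => h2 x (h1 x hx)

-- set-equal lists have the same strict-subset relations
theorem pvStrictSub_congr_right {S T U : List Int} (h : pvSetEq T U = true) :
    pvStrictSub S T = pvStrictSub S U := by
  rw [pvSetEq_iff] at h
  rw [Bool.eq_iff_iff, pvStrictSub_iff, pvStrictSub_iff]
  constructor
  · rintro ⟨a, b⟩; exact ⟨SubP_trans a h.1, fun c => b (SubP_trans h.1 c)⟩
  · rintro ⟨a, b⟩; exact ⟨SubP_trans a h.2, fun c => b (SubP_trans h.2 c)⟩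

-- generic strict countP monotonicity (one witness satisfies q but not p)
theorem countP_lt {α : Type} (l : List α) (p q : α → Bool)
    (h : ∀ x ∈ l, p x = true → q x = true) (u : α) (hu : u ∈ l)
    (hq : q u = true) (hp : ¬ p u = true) : l.countP p < l.countP q := by
  induction l with
  | nil => cases hu
  | cons a l ih =>
    rcases List.mem_cons.1 hu with rfl | hu
    · have hle : l.countP p ≤ l.countP q :=
        List.countP_mono_left (fun x hx => h x (List.mem_cons_of_mem _ hx))
      simp [hq, hp]; omega
    · have := ih (fun x hx => h x (List.mem_cons_of_mem _ hx)) hu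
      by_cases ha : p a = true
      · have hqa := h a List.mem_cons_self ha
        simp [ha, hqa]; omega
      · simp only [List.countP_cons]
        have : (if p a = true then 1 else 0) ≤ (if q a = true then 1 else 0) := by
          split_ifs <;> omega
        omega

-- members of the fold's accumulator come from out or q
theorem mem_foldl_stepB {l : List (List Int)} :
    ∀ (q out : List (List Int)) {T}, T ∈ q.foldl (pvStepB l) out → T ∈ out ∨ T ∈ q := by
  intro q
  induction q with
  | nil => intro out T h; exact Or.inl h
  | cons S q ih =>
    intro out T h
    rcases ih (pvStepB l out S) h with h' | h'
    · unfold pvStepB at h'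
      split_ifs at h' with h1 h2
      · exact Or.inl h'
      · exact Or.inl h'
      · rcases List.mem_append.1 h' with h'' | h''
        · exact Or.inl h''
        · simp at h''; exact Or.inr (by simp [h''])
    · exact Or.inr (List.mem_cons_of_mem _ h')

-- the accumulator only grows
theorem mem_foldl_stepB_mono {l : List (List Int)} :
    ∀ (q out : List (List Int)) {T}, T ∈ out → T ∈ q.foldl (pvStepB l) out := by
  intro q
  induction q with
  | nil => intro out T h; exact h
  | cons S q ih =>
    intro out T h
    apply ih
    unfold pvStepB
    split_ifs <;> simp [h]

-- every member of the fold was either already there or passed the minimality check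
theorem mem_foldl_stepB_min {l : List (List Int)} :
    ∀ (q out : List (List Int)),
      (∀ T ∈ out, l.any (fun U => pvStrictSub U T) = false) →
      ∀ T ∈ q.foldl (pvStepB l) out, l.any (fun U => pvStrictSub U T) = false := by
  intro q
  induction q with
  | nil => intro out h T hT; exact h T hT
  | cons S q ih =>
    intro out h T hT
    refine ih (pvStepB l out S) ?_ T hT
    intro U hU
    unfold pvStepB at hU
    split_ifs at hU with h1 h2
    · exact h U hU
    · exact h U hU
    · rcases List.mem_append.1 hU with h' | h'
      · exact h U h'
      · simp at h'; subst h'; simpa using h1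

-- a minimal member of q has a set-equal representative in the fold
theorem exists_seteq_in_foldl {l : List (List Int)} :
    ∀ (q out : List (List Int)) {S}, S ∈ q →
      l.any (fun U => pvStrictSub U S) = false →
      ∃ T ∈ q.foldl (pvStepB l) out, pvSetEq T S = true := by
  intro q
  induction q with
  | nil => intro out S h; cases h
  | cons U q ih =>
    intro out S hS hmin
    rcases List.mem_cons.1 hS with rfl | hS'
    · have hstep : ∃ T ∈ pvStepB l out S, pvSetEq T S = true := by
        unfold pvStepB
        split_ifs with h1 h2
        · simp [hmin] at h1
        · rcases List.any_eq_true.1 h2 with ⟨T, hT, hTe⟩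
          exact ⟨T, hT, hTe⟩
        · exact ⟨S, by simp, by rw [pvSetEq_iff]; exact ⟨SubP_refl S, SubP_refl S⟩⟩
      rcases hstep with ⟨T, hT, hTe⟩
      exact ⟨T, mem_foldl_stepB_mono q _ hT, hTe⟩
    · exact ih _ hS' hmin

-- every candidate has a subset among the l-minimal candidates
theorem exists_min_below (l : List (List Int)) :
    ∀ S, S ∈ l → ∃ T ∈ l, SubP T S ∧ l.any (fun U => pvStrictSub U T) = false := by
  intro S hS
  generalize hn : (l.countP (fun U => pvStrictSub U S)) = n
  induction n using Nat.strong_induction_on generalizing S with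
  | _ n ihn =>
  by_cases hmin : l.any (fun U => pvStrictSub U S) = true
  · rcases List.any_eq_true.1 hmin with ⟨U, hUl, hUS⟩
    have hcnt : l.countP (fun V => pvStrictSub V U) < l.countP (fun V => pvStrictSub V S) := by
      refine countP_lt l _ _ ?_ U hUl hUS ?_
      · intro V _ hVU
        rw [pvStrictSub_iff] at hVU hUS ⊢
        exact ⟨SubP_trans hVU.1 hUS.1, fun hc => hVU.2 (SubP_trans hUS.1 hc)⟩
      · rw [pvStrictSub_iff]; intro h; exact h.2 h.1
    rw [hn] at hcnt
    rcases ihn _ hcnt U hUl rfl with ⟨T, hTl, hTU, hTmin⟩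
    rw [pvStrictSub_iff] at hUS
    exact ⟨T, hTl, SubP_trans hTU hUS.1, hTmin⟩
  · simp only [Bool.not_eq_true] at hmin
    exact ⟨S, hS, SubP_refl S, hmin⟩

-- hence every candidate has a subset inside pvG l l
theorem exists_sub_in_G (l : List (List Int)) {S : List Int} (hS : S ∈ l) :
    ∃ T ∈ pvG l l, pvSubset T S = true := by
  rcases exists_min_below l S hS with ⟨T, hTl, hTS, hTmin⟩
  rcases exists_seteq_in_foldl (l := l) l [] hTl hTmin with ⟨T', hT', hTe⟩
  rw [pvSetEq_iff] at hTe
  exact ⟨T', hT', (pvSubset_iff _ _).2 (SubP_trans hTe.1 hTS)⟩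

theorem pvG_concat (l q : List (List Int)) (S : List Int) :
    pvG l (q ++ [S]) = pvStepB l (pvG l q) S := by
  unfold pvG; rw [List.foldl_append]; rfl

-- members of pvG l q are l-minimal
theorem mem_pvG_min {l q : List (List Int)} {T : List Int} (h : T ∈ pvG l q) :
    l.any (fun U => pvStrictSub U T) = false :=
  mem_foldl_stepB_min q [] (by intro x hx; cases hx) T h

-- extending the reference list by S filters out the strict supersets of S
theorem pvG_ref_concat (l : List (List Int)) (S : List Int) :
    ∀ q, pvG (l ++ [S]) q = (pvG l q).filter (fun T => !pvStrictSub S T) := by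
  intro q
  induction q using List.reverseRecOn with
  | nil => rfl
  | append_singleton q U ih =>
    rw [pvG_concat, pvG_concat, ih]
    set out := pvG l q with hout
    by_cases h1 : (l.any fun T => pvStrictSub T U) = true
    · have h1' : ((l ++ [S]).any fun T => pvStrictSub T U) = true := by
        simp [List.any_append, h1]
      simp [pvStepB, h1, h1']
    · have h1' : (l.any fun T => pvStrictSub T U) = false := by simpa using h1
      by_cases h2 : pvStrictSub S U = true
      · have h12 : ((l ++ [S]).any fun T => pvStrictSub T U) = true := by
          simp [List.any_append, h2]
        by_cases hd : (out.any fun T => pvSetEq T U) = true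
        · simp [pvStepB, h12, h1', hd]
        · have hd' : (out.any fun T => pvSetEq T U) = false := by simpa using hd
          simp [pvStepB, h12, h1', hd', List.filter_append, h2]
      · have h2' : pvStrictSub S U = false := by simpa using h2
        have h12 : ((l ++ [S]).any fun T => pvStrictSub T U) = false := by
          simp [List.any_append, h1', h2']
        have hdedup : ((out.filter (fun T => !pvStrictSub S T)).any fun T => pvSetEq T U)
            = (out.any fun T => pvSetEq T U) := by
          rw [Bool.eq_iff_iff, List.any_eq_true, List.any_eq_true]
          constructor
          · rintro ⟨T, hT, hTe⟩
            exact ⟨T, (List.mem_filter.1 hT).1, hTe⟩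
          · rintro ⟨T, hT, hTe⟩
            refine ⟨T, List.mem_filter.2 ⟨hT, ?_⟩, hTe⟩
            rw [pvStrictSub_congr_right hTe, h2']
            rfl
        by_cases hd : (out.any fun T => pvSetEq T U) = true
        · simp [pvStepB, h12, h1', hdedup, hd]
        · have hd' : (out.any fun T => pvSetEq T U) = false := by simpa using hd
          simp [pvStepB, h12, h1', hdedup, hd', List.filter_append, h2']

theorem main_lemma : ∀ p : List (List Int), p.foldl pvStepA [] = pvG p p := by
  intro p
  induction p using List.reverseRecOn with
  | nil => rfl
  | append_singleton p S ih =>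
    rw [List.foldl_append, ih, pvG_concat, pvG_ref_concat]
    set out := pvG p p with hout
    by_cases hA : (out.any fun T => pvSubset T S) = true
    · -- A skips S; B returns the same list
      rcases List.any_eq_true.1 hA with ⟨T, hT, hTS⟩
      have hTp : T ∈ p := by
        rcases mem_foldl_stepB p [] hT with h | h
        · cases h
        · exact h
      -- no member of out is a strict superset of S
      have hfix : ∀ U ∈ out, (!pvStrictSub S U) = true := by
        intro U hU
        simp only [Bool.not_eq_true']
        by_contra hc
        simp only [Bool.not_eq_false] at hc
        rw [pvStrictSub_iff] at hc
        have hTU : pvStrictSub T U = true := by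
          rw [pvStrictSub_iff]
          rw [pvSubset_iff] at hTS
          exact ⟨SubP_trans hTS hc.1, fun h => hc.2 (SubP_trans h hTS)⟩
        have hm := mem_pvG_min (l := p) (q := p) hU
        rw [List.any_eq_false] at hm
        exact absurd hTU (by simpa using hm T hTp)
      rw [List.filter_eq_self.2 hfix]
      by_cases hstrict : pvSubset S T = true
      · -- T is set-equal to S: B's dedup check fires
        have hms : ((p ++ [S]).any fun U => pvStrictSub U S) = false := by
          rw [List.any_eq_false]
          intro U hU
          simp only [Bool.not_eq_true]
          rcases List.mem_append.1 hU with hUp | hUS'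
          · by_contra hc
            simp only [Bool.not_eq_false] at hc
            rw [pvStrictSub_iff] at hc
            have hUT : pvStrictSub U T = true := by
              rw [pvStrictSub_iff]
              rw [pvSubset_iff] at hTS hstrict
              exact ⟨SubP_trans hc.1 hstrict, fun h => hc.2 (SubP_trans hstrict h)⟩
            have hm := mem_pvG_min (l := p) (q := p) hT
            rw [List.any_eq_false] at hm
            exact absurd hUT (by simpa using hm U hUp)
          · simp at hUS'
            subst hUS'
            simp only [Bool.eq_false_iff, Ne, pvStrictSub_iff]
            intro hc; exact hc.2 hc.1
        have hds : (out.any fun U => pvSetEq U S) = true := by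
          rw [List.any_eq_true]
          refine ⟨T, hT, ?_⟩
          rw [pvSetEq_iff, ← pvSubset_iff, ← pvSubset_iff]
          exact ⟨hTS, hstrict⟩
        simp [pvStepA, pvStepB, hA, hms, hds]
      · -- T is strictly below S: B's minimality check fires
        have hms : ((p ++ [S]).any fun U => pvStrictSub U S) = true := by
          rw [List.any_eq_true]
          refine ⟨T, List.mem_append_left _ hTp, ?_⟩
          rw [pvStrictSub_iff, ← pvSubset_iff]
          exact ⟨hTS, fun h => hstrict ((pvSubset_iff S T).2 h)⟩
        simp [pvStepA, pvStepB, hA, hms]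
    · -- A appends S (after removing supersets); B appends S too
      have hA' : (out.any fun T => pvSubset T S) = false := by simpa using hA
      have hAf := List.any_eq_false.1 hA'
      have hminS : ((p ++ [S]).any fun T => pvStrictSub T S) = false := by
        rw [List.any_eq_false]
        intro U hU
        simp only [Bool.not_eq_true]
        rcases List.mem_append.1 hU with hUp | hUS'
        · by_contra hc
          simp only [Bool.not_eq_false] at hc
          rcases exists_sub_in_G p hUp with ⟨T, hT, hTU⟩
          have hsub : pvSubset T S = true := by
            rw [pvSubset_iff] at hTU ⊢
            rw [pvStrictSub_iff] at hc
            exact SubP_trans hTU hc.1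
          exact absurd hsub (by simpa using hAf T hT)
        · simp at hUS'
          subst hUS'
          simp only [Bool.eq_false_iff, Ne, pvStrictSub_iff]
          intro hc; exact hc.2 hc.1
      have hded : ((out.filter (fun T => !pvStrictSub S T)).any fun T => pvSetEq T S) = false := by
        rw [List.any_eq_false]
        intro T hT
        have hTo := (List.mem_filter.1 hT).1
        simp only [Bool.not_eq_true]
        rw [Bool.eq_false_iff, Ne, pvSetEq_iff]
        intro hc
        exact absurd ((pvSubset_iff T S).2 hc.1) (by simpa using hAf T hTo)
      have hfc : out.filter (fun T => !pvSubset S T) = out.filter (fun T => !pvStrictSub S T) := by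
        apply List.filter_congr
        intro T hT
        have hTS : pvSubset T S = false := by simpa using hAf T hT
        unfold pvStrictSub
        rw [hTS]
        simp
      simp [pvStepA, pvStepB, hA', hminS, hded, hfc]

-- ===== VERDICT (by name: the statement is the Claim_ definition above) =====
theorem minimal_sets_py_spec : Claim_equal_minimal_sets_py := by
  intro candidates _
  unfold Spec_minimal_sets_py minimal_sets_py minimal_sets_py_alt
  rw [main_lemma]; rfl
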